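-- pv_equiv track=rewrite | github.com/urizlotkin/NDVI | utils.py | find_rainy_season_months
-- ===== SOURCE A (Python) =====
-- def find_rainy_season_months(months):
--     """
--     Given a list of month numbers (1-12), finds:
--     - The closest month after September (10, 11, 12, 1, 2, 3) -> start of rainy season
--     - The closest month before September (8, 7, 6, 5, 4, 3, 2, 1) -> end of rainy season
--     """
--     # Define valid months for start and end of rainy season
--     after_sept_options = [10, 11, 12, 1, 2, 3]
--     before_sept_options = [8, 7, 6, 5, 4, 3, 2, 1]
--
--     # Find closest month after September (preferably from 10, 11, 12 first)
--     after_sept_months = [m for m in months if m in after_sept_options]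
--     if after_sept_months:
--         start_rainy_season = min(after_sept_months, key=lambda x: (abs(9 - x)))
--     else:
--         start_rainy_season = None
--
--     # Find the closest month before September
--     before_sept_months = [m for m in months if m in before_sept_options]
--     end_rainy_season = max(before_sept_months, default=None)
--
--     return start_rainy_season, end_rainy_season
-- ===== SOURCE B (Python) =====
-- def find_rainy_season_months(months):
--     months_set = set(months)
--     start_rainy_season = next((c for c in (10, 11, 12, 3, 2, 1) if c in months_set), None)
--     end_rainy_season = next((c for c in (8, 7, 6, 5, 4, 3, 2, 1) if c in months_set), None)
--     return start_rainy_season, end_rainy_season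
-- ===== Notes on version B (the rewrite author's own statement) =====
-- stated objective: alternative
-- what changed: Replaces A's two filter-the-input-then-min/max passes with building a set of months once and early-exit scanning the fixed candidate months in priority order (candidates sorted by the selection key), returning the first present.
import Mathlib
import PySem

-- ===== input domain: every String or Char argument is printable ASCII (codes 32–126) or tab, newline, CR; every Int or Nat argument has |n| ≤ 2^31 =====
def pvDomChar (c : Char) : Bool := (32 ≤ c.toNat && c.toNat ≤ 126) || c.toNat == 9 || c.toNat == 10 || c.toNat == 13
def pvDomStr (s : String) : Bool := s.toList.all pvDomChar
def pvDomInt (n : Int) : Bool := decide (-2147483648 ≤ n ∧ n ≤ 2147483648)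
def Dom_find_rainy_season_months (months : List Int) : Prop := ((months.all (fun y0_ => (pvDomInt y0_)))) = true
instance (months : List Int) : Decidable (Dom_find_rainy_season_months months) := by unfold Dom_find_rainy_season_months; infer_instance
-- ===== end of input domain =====

-- B replaces A's two filter-then-min/max passes over the input with one set build plus
-- early-exit scans over the fixed candidate months in priority order (objective: alternative).

-- ===== PORT A =====
def find_rainy_season_months (months : List Int) : Option Int × Option Int :=
  let after_sept_options : List Int := [10, 11, 12, 1, 2, 3]
  let before_sept_options : List Int := [8, 7, 6, 5, 4, 3, 2, 1]
  let after_sept_months := months.filter (fun m => after_sept_options.contains m)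
  let start_rainy_season :=
    if after_sept_months ≠ [] then
      PySem.List.min? after_sept_months (fun x => |9 - x|)
    else none
  let before_sept_months := months.filter (fun m => before_sept_options.contains m)
  let end_rainy_season := PySem.List.max? before_sept_months (fun x => x)
  (start_rainy_season, end_rainy_season)

-- ===== PORT B =====
-- Source B's 'next((c for c in cands if c in months_set), None)': first candidate in the set, else none
def pvFirstIn (months_set : PySem.Set Int) : List Int → Option Int
  | [] => none
  | c :: rest => if PySem.Set.contains months_set c then some c else pvFirstIn months_set rest

def find_rainy_season_months_alt (months : List Int) : Option Int × Option Int :=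
  let months_set := PySem.Set.ofList months
  let start_rainy_season := pvFirstIn months_set [10, 11, 12, 3, 2, 1]
  let end_rainy_season := pvFirstIn months_set [8, 7, 6, 5, 4, 3, 2, 1]
  (start_rainy_season, end_rainy_season)

-- ===== PRECONDITION & SPEC =====
def Spec_find_rainy_season_months (months : List Int) (out : Option Int × Option Int) : Prop := out = find_rainy_season_months_alt months
instance (months : List Int) (out : Option Int × Option Int) : Decidable (Spec_find_rainy_season_months months out) := by unfold Spec_find_rainy_season_months; infer_instance

-- ===== CLAIM (what is proved, stated in full; the proofs are below) =====
def Claim_equal_find_rainy_season_months : Prop := ∀ (months : List Int), Dom_find_rainy_season_months months → Spec_find_rainy_season_months months (find_rainy_season_months months)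

-- ===== LEMMAS AND PROOFS =====

lemma pvFirstIn_none {s : PySem.Set Int} {cs : List Int} (h : pvFirstIn s cs = none) :
    ∀ c ∈ cs, c ∉ s := by
  induction cs with
  | nil => intro c hc; cases hc
  | cons c rest ih =>
    intro d hd
    by_cases hc : c ∈ s
    · simp [pvFirstIn, hc] at h
    · simp only [pvFirstIn] at h
      rw [if_neg (by simpa using hc)] at h
      rcases List.mem_cons.mp hd with rfl | hd
      · exact hc
      · exact ih h d hd

lemma pvFirstIn_some (key : Int → Int) {s : PySem.Set Int} {cs : List Int} {c : Int}
    (hp : cs.Pairwise (fun a b => key a < key b)) (h : pvFirstIn s cs = some c) :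
    c ∈ cs ∧ c ∈ s ∧ ∀ d ∈ cs, d ∈ s → key c ≤ key d := by
  induction cs with
  | nil => simp [pvFirstIn] at h
  | cons a rest ih =>
    by_cases hc : a ∈ s
    · have hca : a = c := by simpa [pvFirstIn, hc] using h
      subst hca
      refine ⟨by simp, hc, ?_⟩
      intro d hd _
      rcases List.mem_cons.mp hd with rfl | hd
      · exact le_refl _
      · exact le_of_lt ((List.pairwise_cons.mp hp).1 d hd)
    · simp only [pvFirstIn] at h
      rw [if_neg (by simpa using hc)] at h
      obtain ⟨h1, h2, h3⟩ := ih (List.pairwise_cons.mp hp).2 h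
      refine ⟨List.mem_cons_of_mem _ h1, h2, ?_⟩
      intro d hd hds
      rcases List.mem_cons.mp hd with rfl | hd
      · exact absurd hds hc
      · exact h3 d hd hds

lemma pv_start_eq (months : List Int) :
    (if months.filter (fun m => ([10, 11, 12, 1, 2, 3] : List Int).contains m) ≠ [] then
       PySem.List.min? (months.filter (fun m => ([10, 11, 12, 1, 2, 3] : List Int).contains m)) (fun x => |9 - x|)
     else none) = pvFirstIn (PySem.Set.ofList months) [10, 11, 12, 3, 2, 1] := by
  have hAB : ∀ x ∈ ([10, 11, 12, 1, 2, 3] : List Int), x ∈ ([10, 11, 12, 3, 2, 1] : List Int) := by decide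
  have hBA : ∀ x ∈ ([10, 11, 12, 3, 2, 1] : List Int), x ∈ ([10, 11, 12, 1, 2, 3] : List Int) := by decide
  have hinj : ∀ a ∈ ([10, 11, 12, 1, 2, 3] : List Int), ∀ b ∈ ([10, 11, 12, 1, 2, 3] : List Int),
      |9 - a| = |9 - b| → a = b := by decide
  cases h : pvFirstIn (PySem.Set.ofList months) [10, 11, 12, 3, 2, 1] with
  | none =>
    have habs := pvFirstIn_none h
    have hFnil : months.filter (fun m => ([10, 11, 12, 1, 2, 3] : List Int).contains m) = [] := by
      rw [List.filter_eq_nil_iff]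
      intro m hm hcont
      exact habs m (hAB m (by simpa using hcont)) (by simpa [PySem.Set.mem_ofList] using hm)
    rw [hFnil]
    simp
  | some c =>
    obtain ⟨hc1, hc2, hc3⟩ := pvFirstIn_some (fun x => |9 - x|) (by decide) h
    have hcm : c ∈ months := by simpa [PySem.Set.mem_ofList] using hc2
    have hcopts : c ∈ ([10, 11, 12, 1, 2, 3] : List Int) := hBA c hc1
    have hcf : c ∈ months.filter (fun m => ([10, 11, 12, 1, 2, 3] : List Int).contains m) :=
      List.mem_filter.mpr ⟨hcm, by simpa using hcopts⟩
    have hne : months.filter (fun m => ([10, 11, 12, 1, 2, 3] : List Int).contains m) ≠ [] :=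
      fun e => by rw [e] at hcf; cases hcf
    rw [if_pos hne]
    cases hmin : PySem.List.min? (months.filter (fun m => ([10, 11, 12, 1, 2, 3] : List Int).contains m)) (fun x => |9 - x|) with
    | none => exact absurd ((PySem.List.min?_eq_none_iff _ _).mp hmin) hne
    | some m =>
      have hmF := PySem.List.min?_mem hmin
      have hm_months : m ∈ months := (List.mem_filter.mp hmF).1
      have hm_opts : m ∈ ([10, 11, 12, 1, 2, 3] : List Int) := by
        simpa using (List.mem_filter.mp hmF).2
      have h1 : |9 - m| ≤ |9 - c| := PySem.List.min?_isMin hmin c hcf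
      have h2 : |9 - c| ≤ |9 - m| :=
        hc3 m (hAB m hm_opts) (by simpa [PySem.Set.mem_ofList] using hm_months)
      rw [hinj m hm_opts c hcopts (le_antisymm h1 h2)]

lemma pv_end_eq (months : List Int) :
    PySem.List.max? (months.filter (fun m => ([8, 7, 6, 5, 4, 3, 2, 1] : List Int).contains m)) (fun x => x)
      = pvFirstIn (PySem.Set.ofList months) [8, 7, 6, 5, 4, 3, 2, 1] := by
  cases h : pvFirstIn (PySem.Set.ofList months) [8, 7, 6, 5, 4, 3, 2, 1] with
  | none =>
    have habs := pvFirstIn_none h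
    have hFnil : months.filter (fun m => ([8, 7, 6, 5, 4, 3, 2, 1] : List Int).contains m) = [] := by
      rw [List.filter_eq_nil_iff]
      intro m hm hcont
      exact habs m (by simpa using hcont) (by simpa [PySem.Set.mem_ofList] using hm)
    rw [hFnil]
    exact (PySem.List.max?_eq_none_iff _ _).mpr rfl
  | some c =>
    obtain ⟨hc1, hc2, hc3⟩ := pvFirstIn_some (fun x => -x) (by decide) h
    have hcm : c ∈ months := by simpa [PySem.Set.mem_ofList] using hc2
    have hcf : c ∈ months.filter (fun m => ([8, 7, 6, 5, 4, 3, 2, 1] : List Int).contains m) :=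
      List.mem_filter.mpr ⟨hcm, by simpa using hc1⟩
    cases hmax : PySem.List.max? (months.filter (fun m => ([8, 7, 6, 5, 4, 3, 2, 1] : List Int).contains m)) (fun x => x) with
    | none =>
      rw [(PySem.List.max?_eq_none_iff _ _).mp hmax] at hcf
      cases hcf
    | some m =>
      have hmF := PySem.List.max?_mem hmax
      have hm_months : m ∈ months := (List.mem_filter.mp hmF).1
      have hm_opts : m ∈ ([8, 7, 6, 5, 4, 3, 2, 1] : List Int) := by
        simpa using (List.mem_filter.mp hmF).2
      have h1 : c ≤ m := PySem.List.max?_isMax hmax c hcf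
      have h2 : -c ≤ -m := hc3 m hm_opts (by simpa [PySem.Set.mem_ofList] using hm_months)
      have : m = c := by omega
      rw [this]

-- ===== VERDICT (by name: the statement is the Claim_ definition above) =====
theorem find_rainy_season_months_spec : Claim_equal_find_rainy_season_months := by
  intro months _
  unfold Spec_find_rainy_season_months find_rainy_season_months find_rainy_season_months_alt
  exact Prod.ext (pv_start_eq months) (pv_end_eq months)
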